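-- pv_equiv track=rewrite | github.com/4pierre2/CLOUDY | extract.py | split_grids
-- ===== SOURCE A (Python) =====
-- def split_grids(lines):
--     grids = []
--     grid = []
--     next_grid = False
--     for l in lines:
--         # if "GRID_DELIMIT" in l:
--         if "        Cloudy 17.02" in l:
--             grids.append(grid)
--             grid=[]
--         grid.append(l)
--     grids.append(grid)
--     grids = grids[3:]
--     return grids
-- ===== SOURCE B (Python) =====
-- def split_grids(lines):
--     DELIM = "        Cloudy 17.02"
--     cuts = [i for i, l in enumerate(lines) if DELIM in l]
--     bounds = [0] + cuts + [len(lines)]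
--     groups = [lines[a:b] for a, b in zip(bounds, bounds[1:])]
--     return groups[3:]
-- ===== Notes on version B (the rewrite author's own statement) =====
-- stated objective: alternative
-- what changed: Replaces A's accumulate-and-reset loop (mutable current grid appended and cleared at each delimiter) with an index-table-then-slice decomposition: one pass collects delimiter indices, then the groups are slices between consecutive boundaries [0]+cuts+[len(lines)], finally dropping the first three.
import Mathlib
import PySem

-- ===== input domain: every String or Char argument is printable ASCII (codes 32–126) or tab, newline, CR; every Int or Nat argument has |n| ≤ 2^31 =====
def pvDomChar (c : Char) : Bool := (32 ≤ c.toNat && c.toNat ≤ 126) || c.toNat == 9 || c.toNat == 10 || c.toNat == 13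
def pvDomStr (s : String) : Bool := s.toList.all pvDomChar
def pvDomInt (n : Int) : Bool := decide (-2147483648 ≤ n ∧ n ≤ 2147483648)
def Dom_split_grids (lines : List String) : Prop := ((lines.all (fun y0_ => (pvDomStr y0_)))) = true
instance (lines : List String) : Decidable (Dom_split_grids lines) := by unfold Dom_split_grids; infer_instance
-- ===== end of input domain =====

-- B replaces A's accumulate-and-reset loop by an index-table-then-slice decomposition (same cost; objective: alternative).


def pvDelim : String := "        Cloudy 17.02"

-- ===== PORT A =====
-- A's loop state: (grids, grid); on a delimiter line the current grid is flushed and reset, then l is appended.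
def pvStepA (st : List (List String) × List String) (l : String) : List (List String) × List String :=
  let st' := if PySem.Str.isIn pvDelim l then (st.1 ++ [st.2], ([] : List String)) else st
  (st'.1, st'.2 ++ [l])

def split_grids (lines : List String) : List (List String) :=
  let st := lines.foldl pvStepA (([] : List (List String)), ([] : List String))
  (st.1 ++ [st.2]).drop 3

-- ===== PORT B =====
-- cuts = [i for i, l in enumerate(lines) if DELIM in l]; enumerate indices are nonnegative, so Nat (zipIdx) is exact.
def pvCuts (lines : List String) : List Nat :=
  lines.zipIdx.filterMap (fun p => if PySem.Str.isIn pvDelim p.1 then some p.2 else none)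

-- lines[a:b] here always has 0 ≤ a ≤ b ≤ len(lines), where Python's slice is exactly (drop a).take (b-a).
def split_grids_alt (lines : List String) : List (List String) :=
  let bounds := 0 :: pvCuts lines ++ [lines.length]
  let groups := (bounds.zip bounds.tail).map (fun p => (lines.drop p.1).take (p.2 - p.1))
  groups.drop 3

-- ===== PRECONDITION & SPEC =====
def Spec_split_grids (lines : List String) (out : List (List String)) : Prop := out = split_grids_alt lines
instance (lines : List String) (out : List (List String)) : Decidable (Spec_split_grids lines out) := by unfold Spec_split_grids; infer_instance

-- ===== CLAIM (what is proved, stated in full; the proofs are below) =====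
def Claim_equal_split_grids : Prop := ∀ (lines : List String), Dom_split_grids lines → Spec_split_grids lines (split_grids lines)

-- ===== LEMMAS AND PROOFS =====

-- The slice-map over a boundary list: B's group list before the final drop 3 is
-- pvMapSl lines (0 :: (pvCuts lines ++ [lines.length])).
def pvMapSl (L : List String) (bs : List Nat) : List (List String) :=
  (bs.zip bs.tail).map (fun p => (L.drop p.1).take (p.2 - p.1))

-- Recursive characterisation shared by both sides: groups of ls with pending accumulator acc.
def pvAux : List String → List String → List (List String)
  | [], acc => [acc]
  | l :: ls, acc =>
    if PySem.Str.isIn pvDelim l then acc :: pvAux ls [l] else pvAux ls (acc ++ [l])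

theorem pvAuxA (ls : List String) : ∀ grids grid,
    (ls.foldl pvStepA (grids, grid)).1 ++ [(ls.foldl pvStepA (grids, grid)).2]
      = grids ++ pvAux ls grid := by
  induction ls with
  | nil => intro grids grid; simp [pvAux]
  | cons l ls ih =>
    intro grids grid
    by_cases h : PySem.Chars.isIn pvDelim.toList l.toList = true <;>
      simp [pvAux, pvStepA, h, ih]

theorem pvMapSl_shift (l : String) (ls : List String) (xs : List Nat) :
    pvMapSl (l :: ls) (0 :: xs.map (· + 1))
      = (pvMapSl ls (0 :: xs)).modifyHead (fun g => l :: g) := by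
  cases xs with
  | nil => simp [pvMapSl]
  | cons x xs =>
    simp only [pvMapSl, List.map_cons, List.tail_cons, List.zip_cons_cons,
      List.modifyHead_cons]
    refine congrArg₂ List.cons ?_ ?_
    · simp [List.take_succ_cons]
    · rw [show ((x + 1) :: xs.map (· + 1)) = (x :: xs).map (· + 1) from rfl,
        show (xs.map (· + 1)) = ((x :: xs).tail.map (· + 1)) from rfl,
        List.zip_map, List.map_map, List.tail_cons]
      apply List.map_congr_left
      intro p _
      simp

theorem pvCuts_cons (l : String) (ls : List String) :
    pvCuts (l :: ls)
      = (if PySem.Chars.isIn pvDelim.toList l.toList = true then [0] else [])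
          ++ (pvCuts ls).map (· + 1) := by
  have hz : ls.zipIdx 1 = ls.zipIdx.map (fun p => (p.1, p.2 + 1)) := by
    simpa using List.zipIdx_succ (l := ls) (i := 0)
  by_cases h : PySem.Chars.isIn pvDelim.toList l.toList = true <;>
    · simp [pvCuts, h, List.map_filterMap]
      rw [hz, List.filterMap_map]
      rfl

theorem pvSegs_cons (l : String) (ls : List String) :
    pvMapSl (l :: ls) (0 :: (pvCuts (l :: ls) ++ [(l :: ls).length]))
      = if PySem.Chars.isIn pvDelim.toList l.toList = true
          then [] :: (pvMapSl ls (0 :: (pvCuts ls ++ [ls.length]))).modifyHead (fun g => l :: g)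
          else (pvMapSl ls (0 :: (pvCuts ls ++ [ls.length]))).modifyHead (fun g => l :: g) := by
  by_cases h : PySem.Chars.isIn pvDelim.toList l.toList = true
  · have hb : pvCuts (l :: ls) ++ [(l :: ls).length]
        = 0 :: (pvCuts ls ++ [ls.length]).map (· + 1) := by
      simp [pvCuts_cons, h]
    rw [hb]
    have h00 : pvMapSl (l :: ls) (0 :: 0 :: (pvCuts ls ++ [ls.length]).map (· + 1))
        = [] :: pvMapSl (l :: ls) (0 :: (pvCuts ls ++ [ls.length]).map (· + 1)) := by
      simp [pvMapSl]
    rw [h00, pvMapSl_shift, if_pos h]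
  · have hb : pvCuts (l :: ls) ++ [(l :: ls).length]
        = (pvCuts ls ++ [ls.length]).map (· + 1) := by
      simp [pvCuts_cons, h]
    rw [hb, pvMapSl_shift, if_neg h]

theorem pvAux_segs (ls : List String) : ∀ acc,
    pvAux ls acc
      = (pvMapSl ls (0 :: (pvCuts ls ++ [ls.length]))).modifyHead (fun g => acc ++ g) := by
  induction ls with
  | nil => intro acc; simp [pvAux, pvMapSl, pvCuts]
  | cons l ls ih =>
    intro acc
    rw [pvSegs_cons]
    by_cases h : PySem.Chars.isIn pvDelim.toList l.toList = true
    · simp only [pvAux, PySem.Str.isIn_eq, h, if_true, ih [l], List.modifyHead_cons]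
      cases pvMapSl ls (0 :: (pvCuts ls ++ [ls.length])) <;> simp
    · simp only [pvAux, PySem.Str.isIn_eq, h, ih (acc ++ [l])]
      cases pvMapSl ls (0 :: (pvCuts ls ++ [ls.length])) <;> simp

theorem split_grids_eq (lines : List String) : split_grids lines = split_grids_alt lines := by
  have h1 : split_grids lines = (pvAux lines []).drop 3 := by
    simp only [split_grids]
    rw [pvAuxA lines [] []]
    simp
  have h2 : pvAux lines [] = pvMapSl lines (0 :: (pvCuts lines ++ [lines.length])) := by
    rw [pvAux_segs lines []]
    cases pvMapSl lines (0 :: (pvCuts lines ++ [lines.length])) <;> simp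
  rw [h1, h2]; rfl

-- ===== VERDICT (by name: the statement is the Claim_ definition above) =====
theorem split_grids_spec : Claim_equal_split_grids := by
  intro lines _
  exact split_grids_eq lines
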